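-- pv_equiv track=rewrite | github.com/t0nso1eil/t0nso1eil | homework06/test bayes.py | template_texts
-- ===== SOURCE A (Python) =====
-- from string import punctuation
--
-- def template_texts(texts, types):
--     temp = []
--     for text in texts:
--         temp.append(text.lower())
--     texts = temp
--     temp = []
--     for text in texts:
--         temp.append(text.replace("\n", " ").replace("\r", " "))
--     texts = temp
--     temp = []
--     for text in texts:
--         temp.append(text.split())
--     texts = temp
--     temp = []
--     for text in texts:
--         words = []
--         for word in text:
--             if word not in punctuation:
--                 words.append(word)
--         temp.append(words)
--     texts = temp
--     temp = []
--     for text in texts: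
--         temp.append(" ".join(text))
--     texts = temp
--     temp = []
--     for type in types:
--         if type == "ham":
--             temp.append(0)
--         else:
--             temp.append(1)
--     return texts, types
-- ===== SOURCE B (Python) =====
-- from string import punctuation
--
-- def template_texts(texts, types):
--     # single character-level scan per text instead of A's five staged list rebuilds
--     out = []
--     for text in texts:
--         words = []
--         cur = []
--         for ch in text:
--             ch = ch.lower()
--             if ch.isspace():
--                 if cur:
--                     words.append("".join(cur))
--                     cur = []
--             else:
--                 cur.append(ch)
--         if cur:
--             words.append("".join(cur))
--         out.append(" ".join(w for w in words if w not in punctuation))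
--     return out, types
-- ===== Notes on version B (the rewrite author's own statement) =====
-- stated objective: alternative
-- what changed: Replaces A's five staged whole-list rebuilds via string methods (lower, two replaces, split, punctuation filter, join) with a single character-level state machine per text that lowercases each char, splits words at whitespace on the fly, then filters and joins; the dead types-mapping loop is dropped.
import Mathlib
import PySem

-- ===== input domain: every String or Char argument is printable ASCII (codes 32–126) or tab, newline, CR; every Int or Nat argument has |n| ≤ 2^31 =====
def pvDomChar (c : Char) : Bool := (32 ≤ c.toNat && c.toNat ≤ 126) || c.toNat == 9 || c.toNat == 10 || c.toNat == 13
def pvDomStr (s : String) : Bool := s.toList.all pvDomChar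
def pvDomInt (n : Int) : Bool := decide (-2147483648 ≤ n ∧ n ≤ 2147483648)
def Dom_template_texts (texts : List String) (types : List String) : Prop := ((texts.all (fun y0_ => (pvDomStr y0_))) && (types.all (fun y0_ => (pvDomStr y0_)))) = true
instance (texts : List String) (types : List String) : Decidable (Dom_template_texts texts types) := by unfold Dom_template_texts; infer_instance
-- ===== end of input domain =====

-- B replaces A's five staged list rebuilds (lower / replace / split / filter / join) by one
-- character-level state machine per text (objective: alternative; A's dead `types` loop is dropped).

-- string.punctuation
def pvPunct : String := "!\"#$%&'()*+,-./:;<=>?@[\\]^_`{|}~"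

-- ===== PORT A =====
def template_texts (texts : List String) (types : List String) : List String × List String :=
  let temp1 := texts.foldl (fun acc t => acc ++ [PySem.Str.lower t]) []
  let temp2 := temp1.foldl (fun acc t =>
    acc ++ [PySem.Str.replace (PySem.Str.replace t "\n" " ") "\r" " "]) []
  let temp3 := temp2.foldl (fun acc t => acc ++ [PySem.Str.split₀ t]) ([] : List (List String))
  let temp4 := temp3.foldl (fun acc t =>
    acc ++ [t.foldl (fun ws w => if !PySem.Str.isIn w pvPunct then ws ++ [w] else ws) []]) []
  let temp5 := temp4.foldl (fun acc t => acc ++ [PySem.Str.join " " t]) []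
  -- dead loop over `types` (its result `temp` is discarded by A)
  let _temp6 := types.foldl (fun acc ty => acc ++ [if ty == "ham" then (0 : Int) else 1]) []
  (temp5, types)

-- ===== PORT B =====
-- the inner character loop of Source B: state = (cur word chars, finished words)
def pvScanGo : List Char → List Char → List String → List String
  | [], cur, words => if cur.isEmpty then words else words ++ [String.ofList cur]
  | c :: rest, cur, words =>
    let cl := PySem.Chars.lowerChar c
    if PySem.Chars.isspace cl then
      if cur.isEmpty then pvScanGo rest [] words
      else pvScanGo rest [] (words ++ [String.ofList cur])
    else pvScanGo rest (cur ++ [cl]) words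

def template_texts_alt (texts : List String) (types : List String) : List String × List String :=
  (texts.foldl (fun out t =>
      out ++ [PySem.Str.join " "
        ((pvScanGo t.toList [] []).filter (fun w => !PySem.Str.isIn w pvPunct))]) [],
   types)

-- ===== PRECONDITION & SPEC =====
def Spec_template_texts (texts : List String) (types : List String) (out : List String × List String) : Prop := out = template_texts_alt texts types
instance (texts : List String) (types : List String) (out : List String × List String) : Decidable (Spec_template_texts texts types out) := by unfold Spec_template_texts; infer_instance

-- ===== CLAIM (what is proved, stated in full; the proofs are below) =====
def Claim_equal_template_texts : Prop := ∀ (texts : List String) (types : List String), Dom_template_texts texts types → Spec_template_texts texts types (template_texts texts types)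

-- ===== LEMMAS AND PROOFS =====

-- Python replace with a single-char pattern is the pointwise char substitution.
theorem pvReplaceGo_single (a b : Char) : ∀ (l : List Char) (acc : List Char),
    PySem.Chars.replace.go [a] [b] l.length l acc
      = acc.reverse ++ l.map (fun c => if c = a then b else c) := by
  intro l
  induction l with
  | nil => intro acc; simp [PySem.Chars.replace.go]
  | cons c t ih =>
    intro acc
    simp only [List.length_cons, PySem.Chars.replace.go, List.map_cons]
    by_cases h : c = a
    · subst h
      simp [List.isPrefixOf, ih]
    · have hp : [a].isPrefixOf (c :: t) = false := by
        simp [List.isPrefixOf]; exact fun hca => absurd hca.symm h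
      simp [hp, ih, h]

theorem pvReplace_single (a b : Char) (l : List Char) :
    PySem.Chars.replace l [a] [b] = l.map (fun c => if c = a then b else c) := by
  simp [PySem.Chars.replace, pvReplaceGo_single]

-- split() only looks at the whitespace mask: a map fixing non-space chars and
-- preserving space-ness does not change the result.
theorem pvSplitGo_map (f : Char → Char)
    (hfix : ∀ c, PySem.Chars.isspace c = false → f c = c)
    (hsp : ∀ c, PySem.Chars.isspace (f c) = PySem.Chars.isspace c) :
    ∀ (s : List Char) (cur : List Char) (acc : List (List Char)),
      PySem.Chars.split₀.go (s.map f) cur acc = PySem.Chars.split₀.go s cur acc := by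
  intro s
  induction s with
  | nil => intro cur acc; rfl
  | cons c t ih =>
    intro cur acc
    simp only [List.map_cons, PySem.Chars.split₀.go]
    rw [hsp c]
    by_cases h : PySem.Chars.isspace c
    · simp [h, ih]
    · have : f c = c := hfix c (by simp [h])
      simp [h, this, ih]

theorem pvSplit_map (f : Char → Char)
    (hfix : ∀ c, PySem.Chars.isspace c = false → f c = c)
    (hsp : ∀ c, PySem.Chars.isspace (f c) = PySem.Chars.isspace c)
    (s : List Char) : PySem.Chars.split₀ (s.map f) = PySem.Chars.split₀ s :=
  pvSplitGo_map f hfix hsp s [] []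

-- the two substitution maps '\n'/'\r' ↦ ' ' fix non-space chars and preserve space-ness
theorem pvFixNonspace (a : Char) (ha : PySem.Chars.isspace a = true) :
    ∀ c, PySem.Chars.isspace c = false → (if c = a then ' ' else c) = c := by
  intro c hc
  rw [if_neg]
  rintro rfl
  rw [ha] at hc
  simp at hc

theorem pvSpaceMask (a : Char) (ha : PySem.Chars.isspace a = true) :
    ∀ c, PySem.Chars.isspace (if c = a then ' ' else c) = PySem.Chars.isspace c := by
  intro c
  by_cases h : c = a
  · rw [if_pos h, h, ha]; decide
  · rw [if_neg h]

-- the scanner is split₀ of the lowered text (accumulators related by reversal)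
theorem pvScanGo_eq_splitGo : ∀ (cs cur : List Char) (acc : List String),
    (pvScanGo cs cur acc).map String.toList
      = PySem.Chars.split₀.go (PySem.Chars.lower cs) cur.reverse ((acc.map String.toList).reverse) := by
  intro cs
  induction cs with
  | nil =>
    intro cur acc
    by_cases h : cur.isEmpty <;>
      simp [pvScanGo, PySem.Chars.lower, PySem.Chars.split₀.go, h]
  | cons c t ih =>
    intro cur acc
    simp only [pvScanGo, PySem.Chars.lower, List.map_cons, PySem.Chars.split₀.go]
    by_cases hs : PySem.Chars.isspace (PySem.Chars.lowerChar c)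
    · by_cases hc : cur.isEmpty
      · simp only [hs, hc, if_true]
        have := ih [] acc
        simpa [PySem.Chars.lower, List.isEmpty_iff.mp hc] using this
      · simp only [hs, hc, if_true]
        have := ih [] (acc ++ [String.ofList cur])
        simpa [PySem.Chars.lower, hc] using this
    · simp only [hs]
      have := ih (cur ++ [PySem.Chars.lowerChar c]) acc
      simpa [PySem.Chars.lower] using this

theorem pvScan_words (t : String) :
    pvScanGo t.toList [] []
      = PySem.Str.split₀ (PySem.Str.replace (PySem.Str.replace (PySem.Str.lower t) "\n" " ") "\r" " ") := by
  apply List.map_injective_iff.mpr (fun a b h => String.toList_inj.mp h)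
  rw [PySem.Str.split₀_map_toList, PySem.Str.toList_replace, PySem.Str.toList_replace,
      PySem.Str.toList_lower]
  have hnl : (("\n" : String).toList) = ['\n'] := rfl
  have hcr : (("\r" : String).toList) = ['\r'] := rfl
  have hsp : ((" " : String).toList) = [' '] := rfl
  rw [hnl, hcr, hsp, pvReplace_single, pvReplace_single]
  rw [pvSplit_map (fun c => if c = '\r' then ' ' else c)
        (pvFixNonspace '\r' (by decide)) (pvSpaceMask '\r' (by decide)),
      pvSplit_map (fun c => if c = '\n' then ' ' else c)
        (pvFixNonspace '\n' (by decide)) (pvSpaceMask '\n' (by decide))]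
  have := pvScanGo_eq_splitGo t.toList [] []
  simpa [PySem.Chars.split₀] using this

-- ===== VERDICT (by name: the statement is the Claim_ definition above) =====
theorem template_texts_spec : Claim_equal_template_texts := by
  intro texts types _
  unfold Spec_template_texts template_texts template_texts_alt
  simp only [PySem.List.foldl_append_singleton_eq_map, PySem.List.foldl_append_if_eq_filter,
    List.map_map, List.nil_append]
  refine Prod.ext ?_ rfl
  simp only [Function.comp_def]
  apply List.map_congr_left
  intro t _
  rw [pvScan_words]
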